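-- pv_equiv track=rewrite | github.com/jsggo2001/codingtest | 백준브론즈1/돌려돌려돌림판!.py | solution
-- ===== SOURCE A (Python) =====
-- def solution(x, y, pan, z, n):
--     count = 0
--     small = 0
--     big = 0
--     l = 0
--     for i in range(len(x), 0, -1):
--         a = x[l] * 10 ** (i - 1)
--         small += a
--         l += 1
--     k = 0
--     for j in range(len(y), 0, -1):
--         a = y[k] * 10 ** (j - 1)
--         big += a
--         k += 1
--     pan = pan * 2
--     for o in range(n):
--         m = 0
--         for j in range(z, 0, -1):
--             m += pan[o + (z - j)] * (10 ** (j - 1))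
--         if small <= m <= big:
--             count += 1
--     return count
-- ===== SOURCE B (Python) =====
-- def solution(x, y, pan, z, n):
--     small = 0
--     for d in x:
--         small = small * 10 + d
--     big = 0
--     for d in y:
--         big = big * 10 + d
--     pan2 = pan + pan
--     if n <= 0:
--         return 0
--     if z <= 0:
--         return n if small <= 0 <= big else 0
--     p = 10 ** (z - 1)
--     m = 0
--     for i in range(z):
--         m = m * 10 + pan2[i]
--     count = 1 if small <= m <= big else 0
--     for o in range(1, n):
--         m = (m - pan2[o - 1] * p) * 10 + pan2[o + z - 1]
--         if small <= m <= big: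
--             count += 1
--     return count
-- ===== Notes on version B (the rewrite author's own statement) =====
-- stated objective: faster
-- what changed: B builds small/big by Horner folds and replaces A's recomputation of every z-digit window (inner loop with powers of 10) by a rolling window updated in O(1) per step: m = (m - pan2[o-1]*10^(z-1))*10 + pan2[o+z-1].
import Mathlib
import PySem

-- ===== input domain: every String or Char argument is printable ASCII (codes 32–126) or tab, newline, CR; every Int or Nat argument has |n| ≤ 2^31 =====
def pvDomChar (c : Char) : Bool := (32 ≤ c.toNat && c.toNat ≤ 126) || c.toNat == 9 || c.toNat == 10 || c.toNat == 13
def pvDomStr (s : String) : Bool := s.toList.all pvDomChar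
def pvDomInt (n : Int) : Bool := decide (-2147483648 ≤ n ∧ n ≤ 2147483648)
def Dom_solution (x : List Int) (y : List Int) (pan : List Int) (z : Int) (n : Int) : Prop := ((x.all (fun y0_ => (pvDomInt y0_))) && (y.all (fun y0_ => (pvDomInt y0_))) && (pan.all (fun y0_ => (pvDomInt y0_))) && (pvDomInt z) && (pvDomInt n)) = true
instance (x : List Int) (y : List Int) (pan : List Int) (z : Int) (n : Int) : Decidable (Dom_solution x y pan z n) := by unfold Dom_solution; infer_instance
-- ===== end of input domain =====

-- B replaces A's per-window inner loop by a Horner/rolling-window computation: asymptotically faster (O(n+z) vs O(n*z)).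


-- ===== PORT A =====
def solution (x : List Int) (y : List Int) (pan : List Int) (z : Int) (n : Int) : Int :=
  -- exponents i-1, j-1 are ≥ 0 wherever the loops run, so `10 ^ (…).toNat` is Python's 10 ** (…)
  let sl := (PySem.List.pyRange (x.length : Int) 0 (-1)).foldl
      (fun (st : Int × Int) i => (st.1 + PySem.List.pyGetD x st.2 0 * 10 ^ (i - 1).toNat, st.2 + 1)) (0, 0)
  let small := sl.1
  let bk := (PySem.List.pyRange (y.length : Int) 0 (-1)).foldl
      (fun (st : Int × Int) j => (st.1 + PySem.List.pyGetD y st.2 0 * 10 ^ (j - 1).toNat, st.2 + 1)) (0, 0)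
  let big := bk.1
  let pan2 := pan ++ pan
  (PySem.List.pyRange 0 n 1).foldl
    (fun count o =>
      let m := (PySem.List.pyRange z 0 (-1)).foldl
        (fun m j => m + PySem.List.pyGetD pan2 (o + (z - j)) 0 * 10 ^ (j - 1).toNat) 0
      if small ≤ m ∧ m ≤ big then count + 1 else count) 0

-- ===== PORT B =====
def solution_alt (x : List Int) (y : List Int) (pan : List Int) (z : Int) (n : Int) : Int :=
  let small := x.foldl (fun s d => s * 10 + d) 0
  let big := y.foldl (fun s d => s * 10 + d) 0
  let pan2 := pan ++ pan
  if n ≤ 0 then 0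
  else if z ≤ 0 then (if small ≤ 0 ∧ 0 ≤ big then n else 0)
  else
    let p : Int := 10 ^ (z - 1).toNat   -- z ≥ 1 here, so this is Python's 10 ** (z - 1)
    let m := (PySem.List.pyRange 0 z 1).foldl (fun m i => m * 10 + PySem.List.pyGetD pan2 i 0) 0
    let count : Int := if small ≤ m ∧ m ≤ big then 1 else 0
    ((PySem.List.pyRange 1 n 1).foldl
      (fun (st : Int × Int) o =>
        let m' := (st.2 - PySem.List.pyGetD pan2 (o - 1) 0 * p) * 10 + PySem.List.pyGetD pan2 (o + z - 1) 0
        (if small ≤ m' ∧ m' ≤ big then st.1 + 1 else st.1, m'))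
      (count, m)).1

-- ===== PRECONDITION & SPEC =====
-- Pre_ excludes exactly the inputs where Python A raises IndexError: a window would read pan*2
-- beyond its end (n ≥ 1 and z ≥ 1 with n + z - 2 ≥ 2*len(pan)); B raises there too.
def Pre_solution (x : List Int) (y : List Int) (pan : List Int) (z : Int) (n : Int) : Prop :=
  n ≤ 0 ∨ z ≤ 0 ∨ n + z - 2 < 2 * (pan.length : Int)
instance (x : List Int) (y : List Int) (pan : List Int) (z : Int) (n : Int) : Decidable (Pre_solution x y pan z n) := by unfold Pre_solution; infer_instance
def pvWitness_solution : List Int × List Int × List Int × Int × Int := ([1], [9], [5, 3], 1, 2)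
def Spec_solution (x : List Int) (y : List Int) (pan : List Int) (z : Int) (n : Int) (out : Int) : Prop := out = solution_alt x y pan z n
instance (x : List Int) (y : List Int) (pan : List Int) (z : Int) (n : Int) (out : Int) : Decidable (Spec_solution x y pan z n out) := by unfold Spec_solution; infer_instance

-- ===== CLAIM (what is proved, stated in full; the proofs are below) =====
def Claim_equal_solution : Prop := ∀ (x : List Int) (y : List Int) (pan : List Int) (z : Int) (n : Int), Dom_solution x y pan z n → Pre_solution x y pan z n → Spec_solution x y pan z n (solution x y pan z n)

-- ===== LEMMAS AND PROOFS =====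

-- pvS xs k o = the k-digit base-10 value of xs[o], xs[o+1], …, xs[o+k-1] (via pyGetD with default 0)
def pvS (xs : List Int) : Nat → Int → Int
  | 0, _ => 0
  | k + 1, o => pvS xs k o * 10 + PySem.List.pyGetD xs (o + (k : Int)) 0

theorem pvS_front (xs : List Int) (k : Nat) (o : Int) :
    pvS xs (k + 1) o = PySem.List.pyGetD xs o 0 * 10 ^ k + pvS xs k (o + 1) := by
  induction k generalizing o with
  | zero => simp [pvS]
  | succ k ih =>
    have hidx : o + ((k : Int) + 1) = (o + 1) + (k : Int) := by ring
    calc pvS xs (k + 2) o = pvS xs (k + 1) o * 10 + PySem.List.pyGetD xs (o + ((k : Int) + 1)) 0 := by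
          simp [pvS]
      _ = (PySem.List.pyGetD xs o 0 * 10 ^ k + pvS xs k (o + 1)) * 10
            + PySem.List.pyGetD xs ((o + 1) + (k : Int)) 0 := by rw [ih, hidx]
      _ = PySem.List.pyGetD xs o 0 * 10 ^ (k + 1) + pvS xs (k + 1) (o + 1) := by
          simp [pvS]; ring

theorem pvS_roll (xs : List Int) (k : Nat) (o : Int) (hk : 1 ≤ k) :
    pvS xs k (o + 1)
      = (pvS xs k o - PySem.List.pyGetD xs o 0 * 10 ^ (k - 1)) * 10
        + PySem.List.pyGetD xs (o + (k : Int)) 0 := by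
  obtain ⟨j, rfl⟩ : ∃ j, k = j + 1 := ⟨k - 1, by omega⟩
  have h1 := pvS_front xs j o
  have hidx : o + ((j : Int) + 1) = (o + 1) + (j : Int) := by ring
  have h2 : pvS xs (j + 1) (o + 1) = pvS xs j (o + 1) * 10 + PySem.List.pyGetD xs (o + ((j : Int) + 1)) 0 := by
    simp [pvS, hidx]
  simp only [Nat.add_sub_cancel]
  push_cast
  omega


theorem pvS_append (xs ys : List Int) (k : Nat) (o : Int) (ho : 0 ≤ o)
    (h : o + (k : Int) ≤ (xs.length : Int)) :
    pvS (xs ++ ys) k o = pvS xs k o := by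
  induction k with
  | zero => rfl
  | succ k ih =>
    have hb1 : (0:Int) ≤ o + (k : Int) := by omega
    have hb2 : o + (k : Int) < ((xs ++ ys).length : Int) := by
      simp [List.length_append]; push_cast at h ⊢; omega
    have hb3 : o + (k : Int) < (xs.length : Int) := by push_cast at h; omega
    have hlt : (o + (k : Int)).toNat < xs.length := by omega
    rw [pvS, pvS, ih (by push_cast at h ⊢; omega),
        PySem.List.pyGetD_eq_getElem _ 0 hb1 hb2,
        PySem.List.pyGetD_eq_getElem _ 0 hb1 hb3,
        List.getElem_append_left hlt]

theorem horner_gen (xs : List Int) (s0 : Int) :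
    xs.foldl (fun s d => s * 10 + d) s0 = s0 * 10 ^ xs.length + pvS xs xs.length 0 := by
  induction xs using List.reverseRecOn generalizing s0 with
  | nil => simp [pvS]
  | append_singleton xs d ih =>
    rw [List.foldl_append, ih]
    have h1 : pvS (xs ++ [d]) (xs.length + 1) 0
        = pvS (xs ++ [d]) xs.length 0 * 10 + PySem.List.pyGetD (xs ++ [d]) (0 + (xs.length : Int)) 0 := rfl
    have h2 : pvS (xs ++ [d]) xs.length 0 = pvS xs xs.length 0 :=
      pvS_append xs [d] xs.length 0 (by omega) (by omega)
    have hb1 : (0:Int) ≤ 0 + (xs.length : Int) := by omega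
    have hb2 : 0 + (xs.length : Int) < ((xs ++ [d]).length : Int) := by simp
    have h3 : PySem.List.pyGetD (xs ++ [d]) (0 + (xs.length : Int)) 0 = d := by
      rw [PySem.List.pyGetD_eq_getElem _ 0 hb1 hb2]
      simp
    simp only [List.length_append, List.length_cons, List.length_nil, List.foldl_cons,
      List.foldl_nil, h1, h2, h3]
    ring

theorem foldA_digits_aux (xs : List Int) :
    ∀ (k : Nat) (z s l : Int), z = (k : Int) →
    (PySem.List.pyRange z 0 (-1)).foldl
        (fun (st : Int × Int) i => (st.1 + PySem.List.pyGetD xs st.2 0 * 10 ^ (i - 1).toNat, st.2 + 1)) (s, l)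
      = (s + pvS xs k l, l + (k : Int)) := by
  intro k
  induction k with
  | zero => intro z s l hz; subst hz; rw [PySem.List.pyRange_neg_one_eq_nil (by omega)]; simp [pvS]
  | succ k ih =>
    intro z s l hz
    rw [PySem.List.pyRange_neg_one_cons (by omega), List.foldl_cons,
        ih (z - 1) _ _ (by omega)]
    have he : (z - 1).toNat = k := by omega
    rw [he, pvS_front, Prod.mk.injEq]
    refine ⟨by simp; ring, by simp; ring⟩

theorem digitsA (xs : List Int) (s l : Int) :
    (PySem.List.pyRange (xs.length : Int) 0 (-1)).foldl
        (fun (st : Int × Int) i => (st.1 + PySem.List.pyGetD xs st.2 0 * 10 ^ (i - 1).toNat, st.2 + 1)) (s, l)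
      = (s + pvS xs xs.length l, l + (xs.length : Int)) :=
  foldA_digits_aux xs xs.length _ s l rfl

theorem windowA_aux (xs : List Int) :
    ∀ (k : Nat) (z o m0 : Int), z.toNat = k →
    (PySem.List.pyRange z 0 (-1)).foldl
        (fun m j => m + PySem.List.pyGetD xs (o + (z - j)) 0 * 10 ^ (j - 1).toNat) m0
      = m0 + pvS xs k o := by
  intro k
  induction k with
  | zero =>
    intro z o m0 hz
    rw [PySem.List.pyRange_neg_one_eq_nil (by omega)]; simp [pvS]
  | succ k ih =>
    intro z o m0 hz
    rw [PySem.List.pyRange_neg_one_cons (by omega), List.foldl_cons]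
    have hfun : (fun (m j : Int) => m + PySem.List.pyGetD xs (o + (z - j)) 0 * 10 ^ (j - 1).toNat)
        = (fun (m j : Int) => m + PySem.List.pyGetD xs ((o + 1) + ((z - 1) - j)) 0 * 10 ^ (j - 1).toNat) := by
      funext m j
      have : o + (z - j) = (o + 1) + ((z - 1) - j) := by ring
      rw [this]
    rw [hfun, ih (z - 1) (o + 1) _ (by omega)]
    have h0 : o + (z - z) = o := by ring
    have he : (z - 1).toNat = k := by omega
    rw [h0, he, pvS_front]
    ring

theorem windowA (xs : List Int) (z o m0 : Int) :
    (PySem.List.pyRange z 0 (-1)).foldl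
        (fun m j => m + PySem.List.pyGetD xs (o + (z - j)) 0 * 10 ^ (j - 1).toNat) m0
      = m0 + pvS xs z.toNat o :=
  windowA_aux xs z.toNat z o m0 rfl

-- pvCnt xs zt small big N = how many of the N windows at offsets 0..N-1 lie in [small, big]
def pvCnt (xs : List Int) (zt : Nat) (small big : Int) (N : Int) : Int :=
  (PySem.List.pyRange 0 N 1).foldl
    (fun c o => if small ≤ pvS xs zt o ∧ pvS xs zt o ≤ big then c + 1 else c) 0

theorem countA_eq_pvCnt (xs : List Int) (small big z n : Int) :
    (PySem.List.pyRange 0 n 1).foldl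
      (fun count o =>
        if small ≤ (PySem.List.pyRange z 0 (-1)).foldl
              (fun m j => m + PySem.List.pyGetD xs (o + (z - j)) 0 * 10 ^ (j - 1).toNat) 0
            ∧ (PySem.List.pyRange z 0 (-1)).foldl
              (fun m j => m + PySem.List.pyGetD xs (o + (z - j)) 0 * 10 ^ (j - 1).toNat) 0 ≤ big
        then count + 1 else count) 0
      = pvCnt xs z.toNat small big n := by
  unfold pvCnt
  apply PySem.List.foldl_congr_mem
  intro acc o _
  simp only [windowA, zero_add]

theorem pvCnt_succ (xs : List Int) (zt : Nat) (small big N : Int) (h : 0 ≤ N) :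
    pvCnt xs zt small big (N + 1)
      = pvCnt xs zt small big N + (if small ≤ pvS xs zt N ∧ pvS xs zt N ≤ big then 1 else 0) := by
  unfold pvCnt
  rw [PySem.List.pyRange_one_succ_right (by omega), List.foldl_append]
  simp only [List.foldl_cons, List.foldl_nil]
  split_ifs <;> ring

theorem pvCnt_one (xs : List Int) (zt : Nat) (small big : Int) :
    pvCnt xs zt small big 1 = if small ≤ pvS xs zt 0 ∧ pvS xs zt 0 ≤ big then 1 else 0 := by
  have h := pvCnt_succ xs zt small big 0 (by omega)
  have h0 : pvCnt xs zt small big 0 = 0 := by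
    unfold pvCnt; rw [PySem.List.pyRange_one_eq_nil (by omega)]; rfl
  rw [show (1:Int) = 0 + 1 from rfl, h, h0, zero_add]
  split_ifs <;> ring

theorem pvCnt_zt_zero (xs : List Int) (small big N : Int) (h : 0 ≤ N) :
    pvCnt xs 0 small big N = if small ≤ 0 ∧ 0 ≤ big then N else 0 := by
  obtain ⟨k, rfl⟩ : ∃ k : Nat, N = (k : Int) := ⟨N.toNat, by omega⟩
  induction k with
  | zero =>
    unfold pvCnt; rw [PySem.List.pyRange_one_eq_nil (by omega)]
    simp
  | succ k ih =>
    have : ((k : Int) + 1) = ((k + 1 : Nat) : Int) := by push_cast; ring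
    rw [show ((k + 1 : Nat) : Int) = (k : Int) + 1 by push_cast; ring,
        pvCnt_succ xs 0 small big k (by omega), ih (by omega)]
    show _ + (if small ≤ pvS xs 0 (k : Int) ∧ pvS xs 0 (k : Int) ≤ big then (1:Int) else 0) = _
    have hz : pvS xs 0 (k : Int) = 0 := rfl
    rw [hz]
    split_ifs <;> push_cast <;> ring

theorem foldB_main (xs : List Int) (small big z : Int) (hz : 1 ≤ z) :
    ∀ (k : Nat) (n : Int), n = 1 + (k : Int) →
    (PySem.List.pyRange 1 n 1).foldl
      (fun (st : Int × Int) o =>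
        (if small ≤ (st.2 - PySem.List.pyGetD xs (o - 1) 0 * 10 ^ (z - 1).toNat) * 10
                      + PySem.List.pyGetD xs (o + z - 1) 0
            ∧ (st.2 - PySem.List.pyGetD xs (o - 1) 0 * 10 ^ (z - 1).toNat) * 10
                      + PySem.List.pyGetD xs (o + z - 1) 0 ≤ big
         then st.1 + 1 else st.1,
         (st.2 - PySem.List.pyGetD xs (o - 1) 0 * 10 ^ (z - 1).toNat) * 10
                      + PySem.List.pyGetD xs (o + z - 1) 0))
      (pvCnt xs z.toNat small big 1, pvS xs z.toNat 0)
    = (pvCnt xs z.toNat small big n, pvS xs z.toNat (n - 1)) := by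
  intro k
  induction k with
  | zero =>
    intro n hn
    rw [hn, PySem.List.pyRange_one_eq_nil (by omega), List.foldl_nil]
    norm_num
  | succ k ih =>
    intro n hn
    have hsplit : PySem.List.pyRange 1 n 1 = PySem.List.pyRange 1 (n - 1) 1 ++ [n - 1] := by
      have := PySem.List.pyRange_one_succ_right (a := 1) (b := n - 1) (by omega)
      rw [show n - 1 + 1 = n by ring] at this
      exact this
    rw [hsplit, List.foldl_append, ih (n - 1) (by omega), List.foldl_cons, List.foldl_nil]
    dsimp only
    have hm : (pvS xs z.toNat (n - 1 - 1) - PySem.List.pyGetD xs (n - 1 - 1) 0 * 10 ^ (z - 1).toNat) * 10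
                + PySem.List.pyGetD xs (n - 1 + z - 1) 0 = pvS xs z.toNat (n - 1) := by
      calc (pvS xs z.toNat (n - 1 - 1) - PySem.List.pyGetD xs (n - 1 - 1) 0 * 10 ^ (z - 1).toNat) * 10
                + PySem.List.pyGetD xs (n - 1 + z - 1) 0
          = (pvS xs z.toNat (n - 2) - PySem.List.pyGetD xs (n - 2) 0 * 10 ^ (z.toNat - 1)) * 10
                + PySem.List.pyGetD xs ((n - 2) + (z.toNat : Int)) 0 := by
            rw [show n - 1 - 1 = n - 2 from by ring, show n - 1 + z - 1 = (n - 2) + (z.toNat : Int) from by omega,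
                show (z - 1).toNat = z.toNat - 1 from by omega]
        _ = pvS xs z.toNat ((n - 2) + 1) := (pvS_roll xs z.toNat (n - 2) (by omega)).symm
        _ = pvS xs z.toNat (n - 1) := by rw [show n - 2 + 1 = n - 1 from by ring]
    rw [hm]
    have hcnt : pvCnt xs z.toNat small big n
        = pvCnt xs z.toNat small big (n - 1)
          + (if small ≤ pvS xs z.toNat (n - 1) ∧ pvS xs z.toNat (n - 1) ≤ big then 1 else 0) := by
      have := pvCnt_succ xs z.toNat small big (n - 1) (by omega)
      rw [show n - 1 + 1 = n from by ring] at this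
      exact this
    rw [Prod.mk.injEq]
    exact ⟨by rw [hcnt]; split_ifs <;> ring, rfl⟩

-- ===== VERDICT (by name: the statement is the Claim_ definition above) =====
theorem pvCnt_nonpos (xs : List Int) (zt : Nat) (small big N : Int) (h : N ≤ 0) :
    pvCnt xs zt small big N = 0 := by
  unfold pvCnt; rw [PySem.List.pyRange_one_eq_nil (by omega)]; rfl

theorem foldB_init (xs : List Int) :
    ∀ (k : Nat) (m0 : Int), (PySem.List.pyRange 0 (k : Int) 1).foldl
        (fun m i => m * 10 + PySem.List.pyGetD xs i 0) m0
      = m0 * 10 ^ k + pvS xs k 0 := by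
  intro k
  induction k with
  | zero =>
    intro m0
    rw [PySem.List.pyRange_one_eq_nil (by omega)]
    simp [pvS]
  | succ k ih =>
    intro m0
    rw [show ((k + 1 : Nat) : Int) = (k : Int) + 1 from by omega,
        PySem.List.pyRange_one_succ_right (by omega), List.foldl_append, ih m0,
        List.foldl_cons, List.foldl_nil]
    have : pvS xs (k + 1) 0 = pvS xs k 0 * 10 + PySem.List.pyGetD xs (0 + (k : Int)) 0 := rfl
    rw [this, show (0 : Int) + (k : Int) = (k : Int) from by ring]
    ring

theorem foldB_init' (xs : List Int) (z : Int) (hz : 0 ≤ z) (m0 : Int) :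
    (PySem.List.pyRange 0 z 1).foldl (fun m i => m * 10 + PySem.List.pyGetD xs i 0) m0
      = m0 * 10 ^ z.toNat + pvS xs z.toNat 0 := by
  have h : z = ((z.toNat : Nat) : Int) := by omega
  rw [h, foldB_init xs z.toNat m0]
  simp only [Int.toNat_natCast]

theorem solution_spec : Claim_equal_solution := by
  intro x y pan z n _hdom _hpre
  unfold Spec_solution solution solution_alt
  rw [digitsA x 0 0, digitsA y 0 0, horner_gen x 0, horner_gen y 0]
  simp only [zero_add, zero_mul]
  rw [countA_eq_pvCnt]
  by_cases hn : n ≤ 0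
  · rw [if_pos hn, pvCnt_nonpos _ _ _ _ _ hn]
  · rw [if_neg hn]
    by_cases hz : z ≤ 0
    · have ht : z.toNat = 0 := by omega
      rw [if_pos hz, ht, pvCnt_zt_zero _ _ _ n (by omega)]
    · rw [if_neg hz, foldB_init' (pan ++ pan) z (by omega) 0]
      simp only [zero_mul, zero_add]
      rw [← pvCnt_one (pan ++ pan) z.toNat (pvS x x.length 0) (pvS y y.length 0),
          foldB_main (pan ++ pan) (pvS x x.length 0) (pvS y y.length 0) z (by omega)
            (n - 1).toNat n (by omega)]
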